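-- pv_equiv track=rewrite | github.com/intelitrader/quero-ser | Desafio/DojoPuzzles/Intervalos.py | agrupar_em_intervalos
-- ===== SOURCE A (Python) =====
-- def agrupar_em_intervalos(numeros):
--     numeros.sort()
--     intervalos = []
--     inicio = numeros[0]
--     for i in range(1, len(numeros)):
--         if numeros[i] - numeros[i - 1] > 1:
--             intervalos.append((inicio, numeros[i - 1]))
--             inicio = numeros[i]
--     intervalos.append((inicio, numeros[-1]))
--     return [
--         f"[{i[0]}-{i[1]}]" if i[0] != i[1] else f"[{i[0]}]" for i in intervalos
--     ]
-- ===== SOURCE B (Python) =====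
-- def agrupar_em_intervalos(numeros):
--     numeros.sort()
--     n = len(numeros)
--     breaks = [0] + [i for i in range(1, n) if numeros[i] - numeros[i - 1] > 1] + [n]
--     return [
--         f"[{numeros[s]}-{numeros[e - 1]}]" if numeros[s] != numeros[e - 1] else f"[{numeros[s]}]"
--         for s, e in zip(breaks, breaks[1:])
--     ]
-- ===== Notes on version B (the rewrite author's own statement) =====
-- stated objective: alternative
-- what changed: Replaces A's single accumulating pass carrying (intervals, current-start) state by a two-phase decomposition: first materialize the list of break indices, then map adjacent break pairs to interval strings.
import Mathlib
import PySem

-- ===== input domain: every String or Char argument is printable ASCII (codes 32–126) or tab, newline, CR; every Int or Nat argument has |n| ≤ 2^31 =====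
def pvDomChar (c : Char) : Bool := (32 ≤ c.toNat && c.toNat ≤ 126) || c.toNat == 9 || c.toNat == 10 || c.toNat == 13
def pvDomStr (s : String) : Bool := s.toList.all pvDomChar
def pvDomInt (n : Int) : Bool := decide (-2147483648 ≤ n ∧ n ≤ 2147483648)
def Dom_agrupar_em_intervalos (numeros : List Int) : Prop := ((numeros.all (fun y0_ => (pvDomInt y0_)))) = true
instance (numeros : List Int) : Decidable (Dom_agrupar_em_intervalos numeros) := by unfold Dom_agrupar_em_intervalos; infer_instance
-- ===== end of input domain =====

-- B rebuilds the intervals from a materialized break-index list (two-phase) instead of A's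
-- single accumulating pass; return-value equivalence only (both Pythons sort `numeros` in place).


-- f"[{a}-{b}]" if a != b else f"[{a}]"  (shared f-string formatting of one interval)
def pvFmt (a b : Int) : String :=
  if a ≠ b then "[" ++ PySem.Int.toStr a ++ "-" ++ PySem.Int.toStr b ++ "]"
  else "[" ++ PySem.Int.toStr a ++ "]"

-- ===== PORT A =====
def agrupar_em_intervalos (numeros : List Int) : List String :=
  let ys := PySem.List.sorted numeros (fun x => x) false
  let inicio := PySem.List.pyGetD ys 0 0       -- numeros[0]; IndexError on [] is excluded by Pre_
  let st := (PySem.List.pyRange 1 ys.length 1).foldl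
      (fun (st : List (Int × Int) × Int) i =>
        if 1 < PySem.List.pyGetD ys i 0 - PySem.List.pyGetD ys (i - 1) 0 then
          (st.1 ++ [(st.2, PySem.List.pyGetD ys (i - 1) 0)], PySem.List.pyGetD ys i 0)
        else st) ([], inicio)
  let intervalos := st.1 ++ [(st.2, PySem.List.pyGetD ys (-1) 0)]
  intervalos.map (fun p => pvFmt p.1 p.2)

-- ===== PORT B =====
def agrupar_em_intervalos_alt (numeros : List Int) : List String :=
  let ys := PySem.List.sorted numeros (fun x => x) false
  let n : Int := ys.length
  let breaks := [(0 : Int)] ++ (PySem.List.pyRange 1 n 1).filter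
      (fun i => decide (1 < PySem.List.pyGetD ys i 0 - PySem.List.pyGetD ys (i - 1) 0)) ++ [n]
  (breaks.zip (PySem.List.slice breaks (some 1) none)).map
    (fun se => pvFmt (PySem.List.pyGetD ys se.1 0) (PySem.List.pyGetD ys (se.2 - 1) 0))

-- ===== PRECONDITION & SPEC =====
-- Pre_ excludes exactly the empty list, on which both Pythons raise IndexError (numeros[0]).
def Pre_agrupar_em_intervalos (numeros : List Int) : Prop := numeros ≠ []
instance (numeros : List Int) : Decidable (Pre_agrupar_em_intervalos numeros) := by
  unfold Pre_agrupar_em_intervalos; infer_instance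
def pvWitness_agrupar_em_intervalos : List Int := [5, 1, 2, 3, 7]

def Spec_agrupar_em_intervalos (numeros : List Int) (out : List String) : Prop := out = agrupar_em_intervalos_alt numeros
instance (numeros : List Int) (out : List String) : Decidable (Spec_agrupar_em_intervalos numeros out) := by unfold Spec_agrupar_em_intervalos; infer_instance

-- ===== CLAIM (what is proved, stated in full; the proofs are below) =====
def Claim_equal_agrupar_em_intervalos : Prop := ∀ (numeros : List Int), Dom_agrupar_em_intervalos numeros → Pre_agrupar_em_intervalos numeros → Spec_agrupar_em_intervalos numeros (agrupar_em_intervalos numeros)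

-- ===== LEMMAS AND PROOFS =====

-- adjacent pairs of a list: pairsAdj [a,b,c] = [(a,b),(b,c)]
def pairsAdj : List Int → List (Int × Int)
  | a :: b :: t => (a, b) :: pairsAdj (b :: t)
  | _ => []

theorem zip_tail_eq_pairsAdj (l : List Int) : l.zip l.tail = pairsAdj l := by
  induction l with
  | nil => rfl
  | cons a t ih =>
    cases t with
    | nil => rfl
    | cons b t' =>
      simp only [List.tail_cons, List.zip_cons_cons, pairsAdj]
      rw [← ih]
      rfl

theorem pairsAdj_append_singleton (bs : List Int) (hbs : bs ≠ []) (x : Int) :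
    pairsAdj (bs ++ [x]) = pairsAdj bs ++ [(bs.getLastD 0, x)] := by
  induction bs with
  | nil => exact absurd rfl hbs
  | cons a t ih =>
    cases t with
    | nil => rfl
    | cons b t' =>
      have h2 := ih (by simp)
      simp only [List.cons_append, pairsAdj] at h2 ⊢
      rw [h2]
      simp

-- the invariant of A's loop, stated against B's break list, over an arbitrary base list ys
theorem loop_inv (ys : List Int) (k : Nat) (hk : 1 ≤ k) :
    (PySem.List.pyRange 1 (k : Int) 1).foldl
      (fun (st : List (Int × Int) × Int) i =>
        if 1 < PySem.List.pyGetD ys i 0 - PySem.List.pyGetD ys (i - 1) 0 then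
          (st.1 ++ [(st.2, PySem.List.pyGetD ys (i - 1) 0)], PySem.List.pyGetD ys i 0)
        else st) ([], PySem.List.pyGetD ys 0 0)
    = (((pairsAdj ((0 : Int) :: (PySem.List.pyRange 1 (k : Int) 1).filter
            (fun i => decide (1 < PySem.List.pyGetD ys i 0 - PySem.List.pyGetD ys (i - 1) 0)))).map
          (fun se => (PySem.List.pyGetD ys se.1 0, PySem.List.pyGetD ys (se.2 - 1) 0))),
       PySem.List.pyGetD ys
         (((0 : Int) :: (PySem.List.pyRange 1 (k : Int) 1).filter
            (fun i => decide (1 < PySem.List.pyGetD ys i 0 - PySem.List.pyGetD ys (i - 1) 0))).getLastD 0) 0) := by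
  induction k with
  | zero => omega
  | succ k ih =>
    by_cases hk1 : k = 0
    · subst hk1
      rw [show ((1 : Nat) : Int) = 1 by norm_num, PySem.List.pyRange_one_eq_nil (by norm_num)]
      simp [pairsAdj]
    · have h1k : 1 ≤ k := by omega
      have hrw : PySem.List.pyRange 1 ((k + 1 : Nat) : Int) 1
          = PySem.List.pyRange 1 (k : Int) 1 ++ [(k : Int)] := by
        push_cast
        exact PySem.List.pyRange_one_succ_right (by exact_mod_cast h1k)
      rw [hrw, List.foldl_append, ih h1k, List.filter_append]
      simp only [List.foldl_cons, List.foldl_nil, List.filter_cons, List.filter_nil,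
        decide_eq_true_eq]
      set L := (PySem.List.pyRange 1 (k : Int) 1).filter
        (fun i => decide (1 < PySem.List.pyGetD ys i 0 - PySem.List.pyGetD ys (i - 1) 0)) with hL
      by_cases hc : 1 < PySem.List.pyGetD ys (k : Int) 0 - PySem.List.pyGetD ys ((k : Int) - 1) 0
      · have hlast : ((((0 : Int) :: L) ++ [(k : Int)]).getLastD 0) = (k : Int) :=
          List.getLastD_concat
        rw [if_pos hc, if_pos hc,
          show ((0 : Int) :: (L ++ [(k : Int)])) = (((0 : Int) :: L) ++ [(k : Int)]) from rfl,
          pairsAdj_append_singleton ((0 : Int) :: L) (by simp) ((k : Int)), hlast]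
        simp
      · rw [if_neg hc, if_neg hc]
        simp

theorem getD_neg_one_eq (ys : List Int) (h : ys ≠ []) :
    PySem.List.pyGetD ys (-1) 0 = PySem.List.pyGetD ys ((ys.length : Int) - 1) 0 := by
  have hlen : 0 < ys.length := List.length_pos_iff.mpr h
  have hR := PySem.List.pyGetD_eq_getElem ys (i := (ys.length : Int) - 1) 0
    (by omega) (by omega)
  rw [hR, PySem.List.pyGetD_neg_one ys 0 h, List.getLast_eq_getElem]
  congr 1
  omega

-- the core equality, over the sorted list, for any nonempty list
theorem core_eq (ys : List Int) (h : ys ≠ []) :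
    (let inicio := PySem.List.pyGetD ys 0 0
     let st := (PySem.List.pyRange 1 ys.length 1).foldl
        (fun (st : List (Int × Int) × Int) i =>
          if 1 < PySem.List.pyGetD ys i 0 - PySem.List.pyGetD ys (i - 1) 0 then
            (st.1 ++ [(st.2, PySem.List.pyGetD ys (i - 1) 0)], PySem.List.pyGetD ys i 0)
          else st) ([], inicio)
     let intervalos := st.1 ++ [(st.2, PySem.List.pyGetD ys (-1) 0)]
     intervalos.map (fun p => pvFmt p.1 p.2))
    = (let n : Int := ys.length
       let breaks := [(0 : Int)] ++ (PySem.List.pyRange 1 n 1).filter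
          (fun i => decide (1 < PySem.List.pyGetD ys i 0 - PySem.List.pyGetD ys (i - 1) 0)) ++ [n]
       (breaks.zip (PySem.List.slice breaks (some 1) none)).map
         (fun se => pvFmt (PySem.List.pyGetD ys se.1 0) (PySem.List.pyGetD ys (se.2 - 1) 0))) := by
  have hlen : 1 ≤ ys.length := List.length_pos_iff.mpr h
  simp only [PySem.List.slice_from_one, zip_tail_eq_pairsAdj]
  rw [loop_inv ys ys.length hlen]
  set bk := (PySem.List.pyRange 1 (ys.length : Int) 1).filter
      (fun i => decide (1 < PySem.List.pyGetD ys i 0 - PySem.List.pyGetD ys (i - 1) 0)) with hbk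
  rw [show ([(0:Int)] ++ bk ++ [(ys.length : Int)]) = ((0:Int) :: bk) ++ [(ys.length : Int)] by simp,
      pairsAdj_append_singleton ((0:Int) :: bk) (by simp) ((ys.length : Int))]
  rw [List.map_append, List.map_append, List.map_map]
  congr 1
  simp [pvFmt, getD_neg_one_eq ys h]

-- ===== VERDICT (by name: the statement is the Claim_ definition above) =====
theorem agrupar_em_intervalos_spec : Claim_equal_agrupar_em_intervalos := by
  intro numeros _ hpre
  unfold Spec_agrupar_em_intervalos agrupar_em_intervalos agrupar_em_intervalos_alt
  have hys : PySem.List.sorted numeros (fun x => x) false ≠ [] := by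
    rw [Ne, PySem.List.sorted_eq_nil_iff]; exact hpre
  exact core_eq _ hys
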